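-- pv_equiv track=rewrite | github.com/MrBrantCode/unitest_baseline | mut_generate/mist_train_cf/cf_288/solution.py | count_chars_reverse
-- ===== SOURCE A (Python) =====
-- def count_chars_reverse(s, c):
--     """
--     Removes all occurrences of a character c from a string s and returns a dictionary
--     where the keys are the remaining characters in s (in the order they appear when
--     iterating over s in reverse order) and the values are their corresponding counts.
--
--     Args:
--     s (str): The input string.
--     c (str): The character to be removed.
--
--     Returns:
--     dict: A dictionary where keys are characters and values are their counts.
--     """
--     # Remove all occurrences of c from the original string
--     s = s.replace(c, '')
--
--     # Create a dictionary to store the counts of each character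
--     char_counts = {}
--
--     # Iterate over characters in reverse order
--     for char in reversed(s):
--         # Check if the character is already in the dictionary
--         if char in char_counts:
--             # Increment the count of the character
--             char_counts[char] += 1
--         else:
--             # Add the character to the dictionary with a count of 1
--             char_counts[char] = 1
--
--     # Return the dictionary
--     return char_counts
-- ===== SOURCE B (Python) =====
-- def count_chars_reverse(s, c):
--     t = s.replace(c, '')
--     seen = set()
--     order = []
--     for ch in reversed(t):
--         if ch not in seen:
--             seen.add(ch)
--             order.append(ch)
--     return {ch: t.count(ch) for ch in order}
-- ===== Notes on version B (the rewrite author's own statement) =====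
-- stated objective: alternative
-- what changed: Instead of one fused Python loop that builds and increments a counting dict per character, B first collects the key order by deduplicating reversed(t) with a seen-set loop, then builds the result with one t.count(ch) scan per distinct character.
import Mathlib
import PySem

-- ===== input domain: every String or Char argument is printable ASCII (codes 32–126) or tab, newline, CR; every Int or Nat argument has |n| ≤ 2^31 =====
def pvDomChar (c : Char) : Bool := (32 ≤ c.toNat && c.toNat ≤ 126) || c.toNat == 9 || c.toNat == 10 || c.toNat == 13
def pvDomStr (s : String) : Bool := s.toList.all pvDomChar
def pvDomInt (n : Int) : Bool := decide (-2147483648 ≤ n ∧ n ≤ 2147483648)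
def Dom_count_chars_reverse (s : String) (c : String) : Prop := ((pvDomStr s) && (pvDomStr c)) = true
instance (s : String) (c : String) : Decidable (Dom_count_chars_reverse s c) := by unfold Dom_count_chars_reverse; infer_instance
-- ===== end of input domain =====

-- ===== PORT A =====
-- B separates key ordering (seen-set dedup of reversed t) from counting (one t.count scan per
-- distinct char) instead of A's single fused counting-dict loop; objective: alternative decomposition.
def count_chars_reverse (s : String) (c : String) : List (String × Int) :=
  let t := PySem.Str.replace s c ""
  (t.toList.reverse.foldl
    (fun d ch =>
      let k := String.ofList [ch]
      if d.contains k then d.insert k (d.getD k 0 + 1) else d.insert k 1)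
    PySem.Dict.empty).items

-- ===== PORT B =====
def count_chars_reverse_alt (s : String) (c : String) : List (String × Int) :=
  let t := PySem.Str.replace s c ""
  let order : PySem.Set Char := PySem.Set.ofList t.toList.reverse
  order.map (fun ch => (String.ofList [ch], (PySem.Str.count t (String.ofList [ch]) : Int)))

-- ===== PRECONDITION & SPEC =====
def Spec_count_chars_reverse (s : String) (c : String) (out : List (String × Int)) : Prop := out = count_chars_reverse_alt s c
instance (s : String) (c : String) (out : List (String × Int)) : Decidable (Spec_count_chars_reverse s c out) := by unfold Spec_count_chars_reverse; infer_instance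

-- ===== CLAIM (what is proved, stated in full; proofs are below) =====
def Claim_equal_count_chars_reverse : Prop := ∀ (s : String) (c : String), Dom_count_chars_reverse s c → Spec_count_chars_reverse s c (count_chars_reverse s c)

-- ===== LEMMAS AND PROOFS =====

-- the String key made from one character is injective
theorem mkKey_injective : Function.Injective (fun ch : Char => String.ofList [ch]) := by
  intro a b h
  have := congrArg String.toList h
  simpa using this

-- PySem.Chars.count.go for a single-character needle counts occurrences of that character
theorem go_singleton (c : Char) : ∀ (fuel : Nat) (t : List Char) (acc : Nat), t.length ≤ fuel →
    PySem.Chars.count.go [c] fuel t acc = acc + t.count c := by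
  intro fuel
  induction fuel with
  | zero =>
    intro t acc h
    cases t with
    | nil => simp [PySem.Chars.count.go]
    | cons x xs => simp at h
  | succ n ih =>
    intro t acc h
    cases t with
    | nil => simp [PySem.Chars.count.go]
    | cons x xs =>
      simp only [PySem.Chars.count.go, List.isPrefixOf, List.length_singleton, List.drop_one,
        List.tail_cons, Bool.and_true]
      by_cases hx : c = x
      · subst hx
        rw [if_pos (by simp), ih xs (acc + 1) (by simpa using h), List.count_cons_self]
        omega
      · rw [if_neg (by simp [hx]), ih xs acc (by simpa using h),
          List.count_cons_of_ne (Ne.symm hx)]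

-- t.count(ch) for a one-character string is the character count of t
theorem str_count_singleton (t : String) (ch : Char) :
    PySem.Str.count t (String.ofList [ch]) = t.toList.count ch := by
  have hsub : (String.ofList [ch]).toList = [ch] := by simp
  simp only [PySem.Str.count, hsub, PySem.Chars.count, List.isEmpty_cons, Bool.false_eq_true,
    if_false]
  simpa using go_singleton ch t.toList.length t.toList 0 le_rfl

-- building a set from a mapped list (injective map) is mapping the set built from the list
theorem set_add_foldl_map {f : Char → String} (hf : Function.Injective f) (xs : List Char)
    (s : PySem.Set Char) :
    (xs.map f).foldl PySem.Set.add (s.map f) = (xs.foldl PySem.Set.add s).map f := by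
  induction xs generalizing s with
  | nil => rfl
  | cons x xs ih =>
    simp only [List.map_cons, List.foldl_cons, ← ih]
    congr 1
    by_cases hx : x ∈ s
    · have h2 : ∃ a ∈ s, f a = f x := ⟨x, hx, rfl⟩
      simp [PySem.Set.add, hx, h2]
    · have h2 : ¬ ∃ a ∈ s, f a = f x := fun ⟨a, ha, he⟩ => hx (hf he ▸ ha)
      simp [PySem.Set.add, hx, h2]

theorem set_ofList_map {f : Char → String} (hf : Function.Injective f) (xs : List Char) :
    PySem.Set.ofList (xs.map f) = (PySem.Set.ofList xs).map f := by
  rw [PySem.Set.ofList_eq_foldl, PySem.Set.ofList_eq_foldl]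
  simpa using set_add_foldl_map hf xs []

-- A's dict items equal B's ordered key list paired with full-scan counts
theorem items_eq (t : String) :
    (t.toList.reverse.foldl
      (fun d ch =>
        let k := String.ofList [ch]
        if d.contains k then d.insert k (d.getD k 0 + 1) else d.insert k 1)
      PySem.Dict.empty).items
    = (PySem.Set.ofList t.toList.reverse).map
        (fun ch => (String.ofList [ch], (PySem.Str.count t (String.ofList [ch]) : Int))) := by
  have hfun : (fun (d : PySem.Dict String Int) (ch : Char) =>
      let k := String.ofList [ch]
      if d.contains k then d.insert k (d.getD k 0 + 1) else d.insert k 1)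
      = fun d ch => d.modify (String.ofList [ch]) 0 (· + 1) := by
    funext d ch
    by_cases hc : d.contains (String.ofList [ch]) = true
    · simp [hc, PySem.Dict.modify]
    · simp only [Bool.not_eq_true] at hc
      simp [hc, PySem.Dict.modify, PySem.Dict.getD_of_not_contains _ _ hc]
  have hcounter : t.toList.reverse.foldl
      (fun (d : PySem.Dict String Int) ch => d.modify (String.ofList [ch]) 0 (· + 1))
      PySem.Dict.empty
      = PySem.Dict.counter (t.toList.reverse.map (fun ch => String.ofList [ch])) := by
    rw [PySem.Dict.counter_eq_foldl, List.foldl_map]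
  rw [hfun, hcounter, PySem.Dict.items_counter, set_ofList_map mkKey_injective, List.map_map]
  refine List.map_congr_left (fun ch _ => ?_)
  simp only [Function.comp_apply, Prod.mk.injEq, true_and]
  rw [List.count_map_of_injective _ _ mkKey_injective, List.count_reverse,
    str_count_singleton]

-- ===== VERDICT (by name: the statement is the Claim_ definition above) =====
theorem count_chars_reverse_spec : Claim_equal_count_chars_reverse := by
  intro s c _
  show count_chars_reverse s c = count_chars_reverse_alt s c
  exact items_eq (PySem.Str.replace s c "")
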